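-- pv_equiv track=rewrite | github.com/arch-spatula/technical-interview-for-FE | playground.py | solution
-- ===== SOURCE A (Python) =====
-- def solution(n: int) -> int:
--     answer = 0
--     # 1부터 n까지 순회합니다.
--     for num in range(1, n+1):
--         # 3배수가 되면 안 된다.
--         # 3의 배수가 발생하면 건너뜁니다.
--         if num % 3 == 0: answer += 2
--         # 3의 배수가 아니면 정상순회합니다.
--         elif '3' in str(num):
--             answer = int(str(num).replace('3', '4'))
--         else: answer += 1
--
--
--     return answer
-- ===== SOURCE B (Python) =====
-- def solution(n: int) -> int:
--     # Closed form: only the LAST "reset" number matters; everything after it adds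
--     # 1 per number plus 1 extra per multiple of 3.
--     if n < 1:
--         return 0
--     k = n
--     while k >= 1 and ('3' not in str(k) or k % 3 == 0):
--         k -= 1
--     if k == 0:
--         return n + n // 3
--     return int(str(k).replace('3', '4')) + (n - k) + (n // 3 - k // 3)
-- ===== Notes on version B (the rewrite author's own statement) =====
-- stated objective: faster
-- what changed: Instead of folding the counter update over every number 1..n, B observes that only the last 'reset' number k (largest k<=n containing digit '3' and not divisible by 3) matters: it scans down at most a couple of dozen numbers to find k, then adds the tail contribution (n-k) + (n//3 - k//3) in closed form.
import Mathlib
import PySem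

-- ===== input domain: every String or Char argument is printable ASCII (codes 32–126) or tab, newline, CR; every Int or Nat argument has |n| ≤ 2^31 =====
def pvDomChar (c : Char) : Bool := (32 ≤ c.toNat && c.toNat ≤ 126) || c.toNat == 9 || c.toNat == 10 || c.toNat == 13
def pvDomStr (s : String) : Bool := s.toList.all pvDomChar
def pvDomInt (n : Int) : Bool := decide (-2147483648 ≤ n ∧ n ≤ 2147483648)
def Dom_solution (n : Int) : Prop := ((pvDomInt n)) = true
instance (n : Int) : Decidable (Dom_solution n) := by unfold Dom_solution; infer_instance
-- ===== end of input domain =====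

-- B replaces A's scan of 1..n by a short bounded downward search for the last "reset"
-- number plus a closed-form sum for the tail (objective: faster, asymptotic).

-- ===== PORT A =====
-- answer = int(str(num).replace('3','4')); the parse always succeeds (digits only), getD 0 is unreachable
def solutionStep (answer num : Int) : Int :=
  if PySem.Int.mod num 3 == 0 then answer + 2
  else if PySem.Str.isIn "3" (PySem.Int.toStr num) then
    (PySem.Int.ofStr? (PySem.Str.replace (PySem.Int.toStr num) "3" "4")).getD 0
  else answer + 1

def solution (n : Int) : Int :=
  (PySem.List.pyRange 1 (n + 1) 1).foldl solutionStep 0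

-- ===== PORT B =====
-- the while loop of Source B: decrement k until k < 1 or ('3' in str(k) and k % 3 != 0)
def solutionAltFind (k : Int) : Int :=
  if h : 1 ≤ k then
    if !PySem.Str.isIn "3" (PySem.Int.toStr k) || PySem.Int.mod k 3 == 0 then
      solutionAltFind (k - 1)
    else k
  else k
termination_by k.toNat
decreasing_by omega

def solution_alt (n : Int) : Int :=
  if n < 1 then 0
  else
    let k := solutionAltFind n
    if k == 0 then n + PySem.Int.floordiv n 3
    else (PySem.Int.ofStr? (PySem.Str.replace (PySem.Int.toStr k) "3" "4")).getD 0
         + (n - k) + (PySem.Int.floordiv n 3 - PySem.Int.floordiv k 3)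

-- ===== PRECONDITION & SPEC =====
def Spec_solution (n : Int) (out : Int) : Prop := out = solution_alt n
instance (n : Int) (out : Int) : Decidable (Spec_solution n out) := by unfold Spec_solution; infer_instance

-- ===== CLAIM (what is proved, stated in full; the proofs are below) =====
def Claim_equal_solution : Prop := ∀ (n : Int), Dom_solution n → Spec_solution n (solution n)

-- ===== LEMMAS AND PROOFS =====

theorem find_le (k : Int) : solutionAltFind k ≤ k := by
  induction k using solutionAltFind.induct with
  | case1 k hk hb ih => rw [solutionAltFind, dif_pos hk, if_pos hb]; omega
  | case2 k hk hb => rw [solutionAltFind, dif_pos hk, if_neg hb]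
  | case3 k hk => rw [solutionAltFind, dif_neg hk]

theorem find_nonneg (k : Int) (hk : 0 ≤ k) : 0 ≤ solutionAltFind k := by
  induction k using solutionAltFind.induct with
  | case1 k hk1 hb ih => rw [solutionAltFind, dif_pos hk1, if_pos hb]; exact ih (by omega)
  | case2 k hk1 hb => rw [solutionAltFind, dif_pos hk1, if_neg hb]; omega
  | case3 k hk1 => rw [solutionAltFind, dif_neg hk1]; omega

theorem find_of_bad (k : Int) (hk : 1 ≤ k)
    (hb : (!PySem.Str.isIn "3" (PySem.Int.toStr k) || PySem.Int.mod k 3 == 0) = true) :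
    solutionAltFind k = solutionAltFind (k - 1) := by
  rw [solutionAltFind, dif_pos hk, if_pos hb]

theorem find_of_good (k : Int) (hk : 1 ≤ k)
    (hb : (!PySem.Str.isIn "3" (PySem.Int.toStr k) || PySem.Int.mod k 3 == 0) = false) :
    solutionAltFind k = k := by
  rw [solutionAltFind, dif_pos hk, if_neg (by rw [hb]; simp)]

-- proof-only helper: solution_alt's value written with ediv, as a function of the found k
def altForm (n k : Int) : Int :=
  if k = 0 then n + n / 3
  else (PySem.Int.ofStr? (PySem.Str.replace (PySem.Int.toStr k) "3" "4")).getD 0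
       + (n - k) + (n / 3 - k / 3)

theorem alt_eq (n : Int) (hn : 0 ≤ n) :
    solution_alt n = altForm n (solutionAltFind n) := by
  have hfd : ∀ a : Int, PySem.Int.floordiv a 3 = a / 3 :=
    fun a => PySem.Int.floordiv_eq_ediv_of_pos (by norm_num)
  rcases eq_or_lt_of_le hn with h0 | h1
  · have hf : solutionAltFind 0 = 0 := by rw [solutionAltFind]; simp
    subst h0; simp [solution_alt, altForm, hf]
  · unfold solution_alt altForm
    rw [if_neg (by omega : ¬ n < 1)]
    simp only [hfd, beq_iff_eq]

theorem alt_step (n : Int) (hn : 1 ≤ n) :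
    solution_alt n = solutionStep (solution_alt (n - 1)) n := by
  have hmod : PySem.Int.mod n 3 = n % 3 := PySem.Int.mod_eq_emod_of_pos (a := n) (by norm_num)
  by_cases hm : PySem.Int.mod n 3 = 0
  · -- multiple of 3: answer += 2
    have hd : (3 : Int) ∣ n := Int.dvd_of_emod_eq_zero (by omega)
    have hb : (!PySem.Str.isIn "3" (PySem.Int.toStr n) || PySem.Int.mod n 3 == 0) = true := by
      simp [hd]
    rw [alt_eq n (by omega), alt_eq (n - 1) (by omega), find_of_bad n hn hb]
    have hk0 : 0 ≤ solutionAltFind (n - 1) := find_nonneg _ (by omega)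
    have hkle : solutionAltFind (n - 1) ≤ n - 1 := find_le _
    unfold solutionStep
    rw [if_pos (by simp; exact hd)]
    have h3 : n % 3 = 0 := by omega
    unfold altForm
    split_ifs <;> omega
  · have hnd : ¬ (3 : Int) ∣ n := by
      intro hd
      exact hm (by rw [hmod]; exact Int.emod_eq_zero_of_dvd hd)
    by_cases hin : PySem.Str.isIn "3" (PySem.Int.toStr n) = true
    · -- contains '3', not multiple: reset
      have hb : (!PySem.Str.isIn "3" (PySem.Int.toStr n) || PySem.Int.mod n 3 == 0) = false := by
        simp [hnd]; simpa using hin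
      rw [alt_eq n (by omega), find_of_good n hn hb]
      unfold solutionStep
      rw [if_neg (by simp; exact hnd), if_pos hin]
      unfold altForm
      rw [if_neg (by omega : ¬ n = 0)]
      ring
    · -- no '3', not multiple: answer += 1
      have hb : (!PySem.Str.isIn "3" (PySem.Int.toStr n) || PySem.Int.mod n 3 == 0) = true := by
        simp at hin; simp [hin]
      rw [alt_eq n (by omega), alt_eq (n - 1) (by omega), find_of_bad n hn hb]
      have hk0 : 0 ≤ solutionAltFind (n - 1) := find_nonneg _ (by omega)
      have hkle : solutionAltFind (n - 1) ≤ n - 1 := find_le _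
      unfold solutionStep
      rw [if_neg (by simp; exact hnd), if_neg hin]
      have h3 : ¬ n % 3 = 0 := by omega
      unfold altForm
      split_ifs <;> omega

theorem main_nat (m : Nat) : solution (m : Int) = solution_alt (m : Int) := by
  induction m with
  | zero =>
    simp [solution, solution_alt]
  | succ m ih =>
    have hc : ((m + 1 : Nat) : Int) = (m : Int) + 1 := by push_cast; ring
    rw [hc]
    have hr : PySem.List.pyRange 1 ((m : Int) + 1 + 1) 1
        = PySem.List.pyRange 1 ((m : Int) + 1) 1 ++ [(m : Int) + 1] :=
      PySem.List.pyRange_one_succ_right (by omega)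
    rw [alt_step ((m : Int) + 1) (by omega)]
    simp only [solution, hr, List.foldl_append, List.foldl_cons, List.foldl_nil]
    rw [show (m : Int) + 1 - 1 = (m : Int) by ring, ← ih, solution]

-- ===== VERDICT (by name: the statement is the Claim_ definition above) =====
theorem solution_spec : Claim_equal_solution := by
  intro n _
  unfold Spec_solution
  by_cases h : 0 ≤ n
  · obtain ⟨m, rfl⟩ : ∃ m : Nat, n = (m : Int) := ⟨n.toNat, by omega⟩
    exact main_nat m
  · have hr : PySem.List.pyRange 1 (n + 1) 1 = [] :=
      PySem.List.pyRange_one_eq_nil (by omega)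
    simp [solution, solution_alt, hr]
    omega
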